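-- pv_equiv track=rewrite | github.com/gudanqiangshou/buffett-wiki | code/fix_headings.py | fix_headings_in_text
-- ===== SOURCE A (Python) =====
-- def is_heading_candidate(line: str, prev_line: str) -> bool:
--     stripped = line.rstrip()
--     if not stripped:
--         return False
--     if len(stripped) > 25:
--         return False
--     # Already a heading
--     if stripped.startswith("#"):
--         return False
--     # List item
--     if stripped.startswith(("-", "*", "+")):
--         return False
--     # Blockquote
--     if stripped.startswith(">"):
--         return False
--     # Table row
--     if stripped.startswith("|"):
--         return False
--     # Ends with sentence-ending punctuation → likely normal text
--     if stripped.endswith((".", "。", ",", "，", ":", "：", "!", "！", "?", "？")):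
--         return False
--     # Starts with a digit followed by . → ordered list
--     if len(stripped) > 1 and stripped[0].isdigit() and stripped[1] == ".":
--         return False
--     # Contains wikilink or markdown link → likely inline text
--     if "[[" in stripped or "http" in stripped:
--         return False
--     # Must be preceded by a blank line (the previous line, after rstrip, is empty)
--     if prev_line.strip() != "":
--         return False
--     return True
--
-- def fix_headings_in_text(text: str) -> tuple[str, int]:
--     """Return (fixed_text, change_count)."""
--     lines = text.splitlines()
--     result = []
--     changes = 0
--     in_frontmatter = False
--     frontmatter_done = False
--     in_code_block = False
--
--     for i, line in enumerate(lines):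
--         # Track YAML frontmatter (between first pair of ---)
--         if i == 0 and line.strip() == "---":
--             in_frontmatter = True
--             result.append(line)
--             continue
--         if in_frontmatter and line.strip() == "---":
--             in_frontmatter = False
--             frontmatter_done = True
--             result.append(line)
--             continue
--         if in_frontmatter:
--             result.append(line)
--             continue
--
--         # Track fenced code blocks
--         if line.strip().startswith("```"):
--             in_code_block = not in_code_block
--             result.append(line)
--             continue
--         if in_code_block:
--             result.append(line)
--             continue
--
--         prev_line = lines[i - 1] if i > 0 else ""
--         if is_heading_candidate(line, prev_line):
--             result.append("## " + line)
--             changes += 1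
--         else:
--             result.append(line)
--
--     return "\n".join(result), changes
-- ===== SOURCE B (Python) =====
-- def is_heading_candidate(line: str, prev_line: str) -> bool:
--     stripped = line.rstrip()
--     if not stripped:
--         return False
--     if len(stripped) > 25:
--         return False
--     # Already a heading
--     if stripped.startswith("#"):
--         return False
--     # List item
--     if stripped.startswith(("-", "*", "+")):
--         return False
--     # Blockquote
--     if stripped.startswith(">"):
--         return False
--     # Table row
--     if stripped.startswith("|"):
--         return False
--     # Ends with sentence-ending punctuation → likely normal text
--     if stripped.endswith((".", "。", ",", "，", ":", "：", "!", "！", "?", "？")):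
--         return False
--     # Starts with a digit followed by . → ordered list
--     if len(stripped) > 1 and stripped[0].isdigit() and stripped[1] == ".":
--         return False
--     # Contains wikilink or markdown link → likely inline text
--     if "[[" in stripped or "http" in stripped:
--         return False
--     # Must be preceded by a blank line (the previous line, after rstrip, is empty)
--     if prev_line.strip() != "":
--         return False
--     return True
--
--
-- def _classify(lines):
--     """Per-line 'protected' flags: frontmatter lines, code fences and fenced code."""
--     n = len(lines)
--     flags = []
--     j = 0
--     if n > 0 and lines[0].strip() == "---":
--         flags.append(True)
--         j = 1
--         while j < n:
--             flags.append(True)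
--             if lines[j].strip() == "---":
--                 j += 1
--                 break
--             j += 1
--     in_code = False
--     while j < n:
--         if lines[j].strip().startswith("```"):
--             in_code = not in_code
--             flags.append(True)
--         else:
--             flags.append(in_code)
--         j += 1
--     return flags
--
--
-- def fix_headings_in_text(text: str) -> tuple[str, int]:
--     """Return (fixed_text, change_count)."""
--     lines = text.splitlines()
--     flags = _classify(lines)
--     result = []
--     changes = 0
--     prev = ""
--     for line, prot in zip(lines, flags):
--         if not prot and is_heading_candidate(line, prev):
--             result.append("## " + line)
--             changes += 1
--         else:
--             result.append(line)
--         prev = line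
--     return "\n".join(result), changes
-- ===== Notes on version B (the rewrite author's own statement) =====
-- stated objective: alternative
-- what changed: A's single stateful pass (frontmatter/code-block state interleaved with heading promotion and lines[i-1] indexing) is replaced by a two-phase decomposition: a classification pass computing per-line protected flags, then an emission pass over zip(lines, flags) carrying the previous raw line.
import Mathlib
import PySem

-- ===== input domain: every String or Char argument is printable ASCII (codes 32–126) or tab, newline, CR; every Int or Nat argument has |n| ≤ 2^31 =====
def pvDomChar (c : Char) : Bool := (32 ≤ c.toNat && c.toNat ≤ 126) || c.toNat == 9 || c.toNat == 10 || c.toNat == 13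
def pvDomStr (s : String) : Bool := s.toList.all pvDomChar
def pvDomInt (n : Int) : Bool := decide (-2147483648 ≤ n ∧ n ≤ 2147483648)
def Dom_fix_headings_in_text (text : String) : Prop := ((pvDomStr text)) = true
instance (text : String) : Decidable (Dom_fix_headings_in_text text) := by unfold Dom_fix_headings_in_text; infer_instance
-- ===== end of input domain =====

-- B replaces A's single stateful pass by a two-phase decomposition: a classification pass
-- computing per-line protected flags (frontmatter / fence / fenced code), then an emission
-- pass carrying the previous raw line; objective: alternative decomposition, same cost.

-- ===== PORT A =====
-- shared helper: both Pythons contain this function byte-for-byte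
def is_heading_candidate (line : String) (prev_line : String) : Bool :=
  let stripped := PySem.Str.rstrip line
  if stripped == "" then false
  else if 25 < PySem.Str.len stripped then false
  else if PySem.Str.startswith stripped "#" then false
  else if PySem.Str.startswith stripped "-" || PySem.Str.startswith stripped "*" ||
          PySem.Str.startswith stripped "+" then false
  else if PySem.Str.startswith stripped ">" then false
  else if PySem.Str.startswith stripped "|" then false
  else if PySem.Str.endswith stripped "." || PySem.Str.endswith stripped "。" ||
          PySem.Str.endswith stripped "," || PySem.Str.endswith stripped "，" ||
          PySem.Str.endswith stripped ":" || PySem.Str.endswith stripped "：" ||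
          PySem.Str.endswith stripped "!" || PySem.Str.endswith stripped "！" ||
          PySem.Str.endswith stripped "?" || PySem.Str.endswith stripped "？" then false
  else if 1 < PySem.Str.len stripped &&
          (match PySem.Str.pyGet? stripped 0 with
           | some c => PySem.Chars.isdigit c
           | none => false) &&
          (match PySem.Str.pyGet? stripped 1 with
           | some c => c == '.'
           | none => false) then false
  else if PySem.Str.isIn "[[" stripped || PySem.Str.isIn "http" stripped then false
  else if PySem.Str.strip prev_line != "" then false
  else true

-- A's single loop over enumerate(lines) with state (in_frontmatter, frontmatter_done, in_code_block)
def fhA_loop (lines : List String) : List String → Nat → Bool → Bool → Bool →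
    List String → Int → List String × Int
  | [], _, _, _, _, res, ch => (res, ch)
  | l :: rest, i, inFm, fmDone, inCode, res, ch =>
    if i == 0 && PySem.Str.strip l == "---" then
      fhA_loop lines rest (i + 1) true fmDone inCode (res ++ [l]) ch
    else if inFm && PySem.Str.strip l == "---" then
      fhA_loop lines rest (i + 1) false true inCode (res ++ [l]) ch
    else if inFm then
      fhA_loop lines rest (i + 1) inFm fmDone inCode (res ++ [l]) ch
    else if PySem.Str.startswith (PySem.Str.strip l) "```" then
      fhA_loop lines rest (i + 1) inFm fmDone (!inCode) (res ++ [l]) ch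
    else if inCode then
      fhA_loop lines rest (i + 1) inFm fmDone inCode (res ++ [l]) ch
    else
      let prev_line := if 0 < i then PySem.List.pyGetD lines ((i : Int) - 1) "" else ""
      if is_heading_candidate l prev_line then
        fhA_loop lines rest (i + 1) inFm fmDone inCode (res ++ ["## " ++ l]) (ch + 1)
      else
        fhA_loop lines rest (i + 1) inFm fmDone inCode (res ++ [l]) ch

def fix_headings_in_text (text : String) : String × Int :=
  let lines := PySem.Str.splitlines text
  let r := fhA_loop lines lines 0 false false false [] 0
  (PySem.Str.join "\n" r.1, r.2)

-- ===== PORT B =====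
-- classification pass: flags for lines after the frontmatter, toggling on code fences
def codeFlags : List String → Bool → List Bool
  | [], _ => []
  | l :: rest, inCode =>
    if PySem.Str.startswith (PySem.Str.strip l) "```" then true :: codeFlags rest (!inCode)
    else inCode :: codeFlags rest inCode

-- classification pass: frontmatter lines up to and including the closing '---'
def fmFlags : List String → List Bool
  | [] => []
  | l :: rest =>
    if PySem.Str.strip l == "---" then true :: codeFlags rest false
    else true :: fmFlags rest

def classify : List String → List Bool
  | [] => []
  | l0 :: rest =>
    if PySem.Str.strip l0 == "---" then true :: fmFlags rest
    else codeFlags (l0 :: rest) false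

-- emission pass over zip(lines, flags), carrying the previous raw line
def emitLoop : List (String × Bool) → List String → Int → String → List String × Int
  | [], res, ch, _ => (res, ch)
  | (l, prot) :: rest, res, ch, prev =>
    if !prot && is_heading_candidate l prev then
      emitLoop rest (res ++ ["## " ++ l]) (ch + 1) l
    else
      emitLoop rest (res ++ [l]) ch l

def fix_headings_in_text_alt (text : String) : String × Int :=
  let lines := PySem.Str.splitlines text
  let flags := classify lines
  let r := emitLoop (lines.zip flags) [] 0 ""
  (PySem.Str.join "\n" r.1, r.2)

-- ===== PRECONDITION & SPEC =====
def Spec_fix_headings_in_text (text : String) (out : String × Int) : Prop := out = fix_headings_in_text_alt text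
instance (text : String) (out : String × Int) : Decidable (Spec_fix_headings_in_text text out) := by unfold Spec_fix_headings_in_text; infer_instance

-- ===== CLAIM (what is proved, stated in full; the proofs are below) =====
def Claim_equal_fix_headings_in_text : Prop := ∀ (text : String), Dom_fix_headings_in_text text → Spec_fix_headings_in_text text (fix_headings_in_text text)

-- ===== LEMMAS AND PROOFS =====

-- code-block phase: outside the frontmatter, A's loop agrees with B's emit over codeFlags,
-- provided prev matches A's lines[i-1] convention and line 0 is not a '---' opener.
theorem code_phase (lines : List String) (fmDone : Bool) :
    ∀ (rest : List String) (i : Nat) (inCode : Bool) (res : List String) (ch : Int)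
      (prev : String),
      lines.drop i = rest →
      prev = (if 0 < i then PySem.List.pyGetD lines ((i : Int) - 1) "" else "") →
      (i = 0 → ∀ l ls, rest = l :: ls → ¬ (PySem.Str.strip l == "---") = true) →
      fhA_loop lines rest i false fmDone inCode res ch
        = emitLoop (rest.zip (codeFlags rest inCode)) res ch prev := by
  intro rest
  induction rest with
  | nil => intro i inCode res ch prev _ _ _; simp [fhA_loop, codeFlags, emitLoop]
  | cons l ls ih =>
    intro i inCode res ch prev hdrop hprev h0
    have hl : lines[i]? = some l := by
      have h := congrArg (fun t => t[0]?) hdrop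
      simpa using h
    have hdrop' : lines.drop (i + 1) = ls := by
      have h := congrArg (List.drop 1) hdrop
      simpa [List.drop_drop] using h
    have hprev' : (l : String)
        = (if 0 < i + 1 then PySem.List.pyGetD lines (((i + 1 : Nat) : Int) - 1) "" else "") := by
      have hc : ((i + 1 : Nat) : Int) - 1 = ((i : Nat) : Int) := by push_cast; ring
      rw [if_pos (Nat.succ_pos i), hc, PySem.List.pyGetD_natCast]
      simp [List.getD, hl]
    subst hprev
    by_cases hfirst : (i == 0 && PySem.Str.strip l == "---") = true
    · exfalso
      simp only [Bool.and_eq_true, beq_iff_eq] at hfirst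
      obtain ⟨h1, h2⟩ := hfirst
      exact h0 h1 l ls rfl (by simp [h2])
    · by_cases hfence : PySem.Str.startswith (PySem.Str.strip l) "```" = true
      · simp only [fhA_loop, codeFlags, hfence, List.zip_cons_cons, emitLoop, hfirst,
          if_false, if_true, Bool.not_true, Bool.false_and, Bool.false_eq_true]
        exact ih (i + 1) (!inCode) (res ++ [l]) ch l hdrop' hprev' (by omega)
      · cases inCode with
        | true =>
          simp only [fhA_loop, codeFlags, hfence, List.zip_cons_cons, emitLoop, hfirst,
            Bool.false_and, Bool.false_eq_true, Bool.not_true, if_false]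
          exact ih (i + 1) true (res ++ [l]) ch l hdrop' hprev' (by omega)
        | false =>
          simp only [fhA_loop, codeFlags, hfence, List.zip_cons_cons, emitLoop, hfirst,
            Bool.false_and, Bool.false_eq_true, Bool.not_false, Bool.true_and, if_false]
          by_cases hcand :
              is_heading_candidate l
                (if 0 < i then PySem.List.pyGetD lines ((i : Int) - 1) "" else "") = true
          · rw [if_pos hcand, if_pos hcand]
            exact ih (i + 1) false (res ++ ["## " ++ l]) (ch + 1) l hdrop' hprev' (by omega)
          · rw [if_neg hcand, if_neg hcand]
            exact ih (i + 1) false (res ++ [l]) ch l hdrop' hprev' (by omega)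

-- frontmatter phase: while in_frontmatter, A's loop agrees with B's emit over fmFlags
theorem fm_phase (lines : List String) (fmDone : Bool) :
    ∀ (rest : List String) (i : Nat) (res : List String) (ch : Int) (prev : String),
      lines.drop i = rest → 0 < i →
      fhA_loop lines rest i true fmDone false res ch
        = emitLoop (rest.zip (fmFlags rest)) res ch prev := by
  intro rest
  induction rest with
  | nil => intro i res ch prev _ _; simp [fhA_loop, fmFlags, emitLoop]
  | cons l ls ih =>
    intro i res ch prev hdrop hi
    have hi0 : ¬ (i == 0) = true := by simp; omega
    have hdrop' : lines.drop (i + 1) = ls := by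
      have h := congrArg (List.drop 1) hdrop
      simpa [List.drop_drop] using h
    have hprev' : (l : String)
        = (if 0 < i + 1 then PySem.List.pyGetD lines (((i + 1 : Nat) : Int) - 1) "" else "") := by
      have hl : lines[i]? = some l := by
        have h := congrArg (fun t => t[0]?) hdrop
        simpa using h
      have hc : ((i + 1 : Nat) : Int) - 1 = ((i : Nat) : Int) := by push_cast; ring
      rw [if_pos (Nat.succ_pos i), hc, PySem.List.pyGetD_natCast]
      simp [List.getD, hl]
    by_cases hclose : (PySem.Str.strip l == "---") = true
    · simp only [fhA_loop, fmFlags, hclose, List.zip_cons_cons, emitLoop, hi0,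
        Bool.false_and, Bool.and_true, Bool.false_eq_true, Bool.not_true,
        if_false, if_true]
      exact code_phase lines true ls (i + 1) false (res ++ [l]) ch l hdrop' hprev' (by omega)
    · simp only [fhA_loop, fmFlags, hclose, List.zip_cons_cons, emitLoop, hi0,
        Bool.false_and, Bool.and_true, Bool.false_eq_true, Bool.not_true,
        if_false, if_true]
      exact ih (i + 1) (res ++ [l]) ch l hdrop' (by omega)

theorem loops_agree (lines : List String) :
    fhA_loop lines lines 0 false false false [] 0
      = emitLoop (lines.zip (classify lines)) [] 0 "" := by
  cases lines with
  | nil => simp [fhA_loop, classify, emitLoop]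
  | cons l0 rest =>
    by_cases hfm : (PySem.Str.strip l0 == "---") = true
    · simp only [fhA_loop, classify, hfm, List.zip_cons_cons, emitLoop, Bool.and_true,
        Bool.not_true, Bool.false_and, Bool.false_eq_true, if_false, if_true,
        beq_self_eq_true]
      exact fm_phase (l0 :: rest) false rest 1 [l0] 0 l0 (by simp) (by omega)
    · rw [show classify (l0 :: rest) = codeFlags (l0 :: rest) false by simp [classify, hfm]]
      exact code_phase (l0 :: rest) false (l0 :: rest) 0 false [] 0 "" rfl rfl
        (by intro _ l ls h hl; cases h; exact hfm hl)

-- ===== VERDICT (by name: the statement is the Claim_ definition above) =====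
theorem fix_headings_in_text_spec : Claim_equal_fix_headings_in_text := by
  intro text _
  simp only [Spec_fix_headings_in_text, fix_headings_in_text, fix_headings_in_text_alt]
  rw [loops_agree]
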